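-- pv_equiv track=rewrite | github.com/gorzan/advent-of-code-2020 | day-6/day-6.py | common_letters
-- ===== SOURCE A (Python) =====
-- def common_letters(group):
--     common_letters = []
--     for answer in group:
--         for letter in answer:
--             common = True
--             for other_answers in group:
--                 if letter not in other_answers:
--                     common = False
--             if common and (letter not in common_letters):
--                 common_letters.append(letter)
--     return common_letters
-- ===== SOURCE B (Python) =====
-- def common_letters(group):
--     if not group:
--         return []
--     common = set(group[0])
--     for ans in group[1:]:
--         common &= set(ans)
--     result = []
--     seen = set()
--     for ch in "".join(group):
--         if ch in common and ch not in seen: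
--             seen.add(ch)
--             result.append(ch)
--     return result
-- ===== Notes on version B (the rewrite author's own statement) =====
-- stated objective: faster
-- what changed: A rescans the whole group (and the result list) for every letter of every answer; B computes the set-intersection of all answers once and then makes a single ordered deduplicating pass over the concatenated answers.
import Mathlib
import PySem

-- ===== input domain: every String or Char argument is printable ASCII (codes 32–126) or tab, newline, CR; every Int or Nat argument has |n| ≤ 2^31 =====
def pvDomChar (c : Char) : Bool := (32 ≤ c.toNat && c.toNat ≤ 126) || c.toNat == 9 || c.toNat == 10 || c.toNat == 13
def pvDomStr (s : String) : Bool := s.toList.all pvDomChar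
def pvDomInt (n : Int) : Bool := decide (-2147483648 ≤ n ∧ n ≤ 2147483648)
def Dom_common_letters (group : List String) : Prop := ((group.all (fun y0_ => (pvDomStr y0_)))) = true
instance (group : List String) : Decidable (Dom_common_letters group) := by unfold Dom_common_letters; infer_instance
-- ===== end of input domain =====

-- B replaces A's quadratic rescan-per-letter with one set intersection plus a single ordered
-- deduplicating pass over the concatenated answers (objective: faster).

-- ===== PORT A =====
-- literal transliteration: three nested loops; the innermost recomputes 'common' by scanning
-- the whole group for each letter, and membership in the growing result list is a linear scan.
def common_letters (group : List String) : List String :=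
  group.foldl (fun cl answer =>
    answer.toList.foldl (fun cl letter =>
      let common := group.foldl (fun common other_answers =>
        if !(other_answers.toList.contains letter) then false else common) true
      if common && !(cl.contains (String.ofList [letter])) then cl ++ [String.ofList [letter]] else cl) cl) []

-- ===== PORT B =====
-- transliteration of Source B: intersection of all answers' character sets, then one pass over
-- the concatenation ("".join(group) = flatMap toList) with a 'seen' set.
def common_letters_alt (group : List String) : List String :=
  match group with
  | [] => []
  | g0 :: rest =>
    let common : PySem.Set Char :=
      rest.foldl (fun s ans => PySem.Set.inter s (PySem.Set.ofList ans.toList))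
        (PySem.Set.ofList g0.toList)
    (((g0 :: rest).flatMap String.toList).foldl
      (fun (p : List String × PySem.Set Char) ch =>
        if PySem.Set.contains common ch && !(PySem.Set.contains p.2 ch)
        then (p.1 ++ [String.ofList [ch]], PySem.Set.add p.2 ch) else p)
      ([], PySem.Set.empty)).1

-- ===== PRECONDITION & SPEC =====
def Spec_common_letters (group : List String) (out : List String) : Prop := out = common_letters_alt group
instance (group : List String) (out : List String) : Decidable (Spec_common_letters group out) := by unfold Spec_common_letters; infer_instance

-- ===== CLAIM (what is proved, stated in full; the proofs are below) =====
def Claim_equal_common_letters : Prop := ∀ (group : List String), Dom_common_letters group → Spec_common_letters group (common_letters group)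

-- ===== LEMMAS AND PROOFS =====

-- A's innermost loop computes "letter is in every answer of the group".
theorem cl_inner_fold (group : List String) (letter : Char) (b : Bool) :
    group.foldl (fun common other_answers =>
      if !(other_answers.toList.contains letter) then false else common) b
    = (b && decide (∀ s ∈ group, letter ∈ s.toList)) := by
  induction group generalizing b with
  | nil => simp
  | cons s rest ih =>
    simp only [List.foldl_cons, ih]
    by_cases h : letter ∈ s.toList <;> simp [h]

-- A's nested loops over (answer, letter) are one fold over the concatenated characters.
theorem cl_flatten (group : List String) (f : List String → Char → List String)
    (init : List String) :
    group.foldl (fun cl answer => answer.toList.foldl f cl) init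
    = (group.flatMap String.toList).foldl f init := by
  induction group generalizing init with
  | nil => rfl
  | cons s rest ih => simp [List.foldl_cons, List.flatMap_cons, List.foldl_append, ih]

-- membership in B's folded intersection
theorem cl_inter_fold (rest : List String) (s : PySem.Set Char) (c : Char) :
    c ∈ rest.foldl (fun s ans => PySem.Set.inter s (PySem.Set.ofList ans.toList)) s
    ↔ c ∈ s ∧ ∀ a ∈ rest, c ∈ a.toList := by
  induction rest generalizing s with
  | nil => simp
  | cons a rest ih =>
    simp [List.foldl_cons, ih, PySem.Set.mem_inter, PySem.Set.mem_ofList, and_assoc]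

theorem cl_mk_singleton_inj (c c' : Char) : String.ofList [c] = String.ofList [c'] ↔ c = c' := by
  constructor
  · intro h
    have := congrArg String.toList h
    simpa using this
  · intro h; rw [h]

-- main loop invariant: both passes, driven by the same boolean test q, build the same list
theorem cl_main (q : Char → Bool) (L : List Char) (cl : List String) (seen : PySem.Set Char)
    (hinv : ∀ c, String.ofList [c] ∈ cl ↔ c ∈ seen) :
    L.foldl (fun cl letter =>
        if q letter && !(cl.contains (String.ofList [letter])) then cl ++ [String.ofList [letter]] else cl) cl
    = (L.foldl (fun (p : List String × PySem.Set Char) ch =>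
        if q ch && !(PySem.Set.contains p.2 ch)
        then (p.1 ++ [String.ofList [ch]], PySem.Set.add p.2 ch) else p) (cl, seen)).1 := by
  induction L generalizing cl seen with
  | nil => rfl
  | cons c L ih =>
    simp only [List.foldl_cons]
    have hc : cl.contains (String.ofList [c]) = PySem.Set.contains seen c := by
      simp only [PySem.Set.contains_eq_listContains, List.contains_eq_mem]
      exact decide_eq_decide.mpr (hinv c)
    rw [hc]
    by_cases hq : (q c && !(PySem.Set.contains seen c)) = true
    · rw [if_pos hq, if_pos hq]
      apply ih
      intro c'
      simp only [List.mem_append, List.mem_singleton, cl_mk_singleton_inj,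
        PySem.Set.mem_add, hinv]
    · rw [if_neg hq, if_neg hq]
      exact ih cl seen hinv

-- ===== VERDICT (by name: the statement is the Claim_ definition above) =====
theorem common_letters_spec : Claim_equal_common_letters := by
  intro group _
  unfold Spec_common_letters common_letters common_letters_alt
  cases group with
  | nil => rfl
  | cons g0 rest =>
    simp only []
    rw [cl_flatten]
    have hq : ∀ c : Char,
        (decide (∀ s ∈ g0 :: rest, c ∈ s.toList))
        = PySem.Set.contains
            (rest.foldl (fun s ans => PySem.Set.inter s (PySem.Set.ofList ans.toList))
              (PySem.Set.ofList g0.toList)) c := by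
      intro c
      simp only [PySem.Set.contains_eq_listContains, List.contains_eq_mem]
      apply decide_eq_decide.mpr
      rw [cl_inter_fold, PySem.Set.mem_ofList]
      constructor
      · intro hall
        exact ⟨hall g0 (by simp), fun a ha => hall a (by simp [ha])⟩
      · rintro ⟨h0, hr⟩ s hs
        rcases List.mem_cons.mp hs with rfl | hs
        · exact h0
        · exact hr s hs
    have hstep : (fun (cl : List String) (letter : Char) =>
        let common := (g0 :: rest).foldl (fun common other_answers =>
          if !(other_answers.toList.contains letter) then false else common) true
        if common && !(cl.contains (String.ofList [letter])) then cl ++ [String.ofList [letter]] else cl)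
      = (fun (cl : List String) (letter : Char) =>
        if (PySem.Set.contains
              (rest.foldl (fun s ans => PySem.Set.inter s (PySem.Set.ofList ans.toList))
                (PySem.Set.ofList g0.toList)) letter) && !(cl.contains (String.ofList [letter]))
        then cl ++ [String.ofList [letter]] else cl) := by
      funext cl letter
      simp only [cl_inner_fold, Bool.true_and, hq letter]
    rw [hstep]
    exact cl_main _ ((g0 :: rest).flatMap String.toList) [] PySem.Set.empty
      (by intro c; simp [PySem.Set.empty])
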